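-- pv_equiv track=rewrite | github.com/alekseivoroshilov/db-course-spydatabase-2021 | cursov_db/db_interface.py | format_operators
-- ===== SOURCE A (Python) =====
-- def format_operators(elements):
--     string = ""
--     i = 0
--     for elem in elements:
--         if i == 0:
--             string += "id: "
--             string += str(elem)
--             string += '\n'
--             i += 1
--             continue
--         elif i == 1:
--             string += "info: "
--             string += str(elem)
--             string += '\n'
--             i += 1
--             continue
--         elif i == 2:
--             string += "available: "
--             string += str(elem)
--             string += '\n\n'
--             i = 0
--             continue
--     return string
-- ===== SOURCE B (Python) =====
-- def format_operators(elements):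
--     elems = list(elements)
--     parts = []
--     for i in range(0, len(elems), 3):
--         group = elems[i:i+3]
--         block = "id: " + str(group[0]) + "\n"
--         if len(group) > 1:
--             block += "info: " + str(group[1]) + "\n"
--         if len(group) > 2:
--             block += "available: " + str(group[2]) + "\n\n"
--         parts.append(block)
--     return "".join(parts)
-- ===== Notes on version B (the rewrite author's own statement) =====
-- stated objective: alternative
-- what changed: Replaces A's per-element loop with a cycling counter state machine by a chunking decomposition: the list is processed in groups of three (range step 3 + slice), each group formatted as one id/info/available block and the blocks joined at the end.
import Mathlib
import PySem

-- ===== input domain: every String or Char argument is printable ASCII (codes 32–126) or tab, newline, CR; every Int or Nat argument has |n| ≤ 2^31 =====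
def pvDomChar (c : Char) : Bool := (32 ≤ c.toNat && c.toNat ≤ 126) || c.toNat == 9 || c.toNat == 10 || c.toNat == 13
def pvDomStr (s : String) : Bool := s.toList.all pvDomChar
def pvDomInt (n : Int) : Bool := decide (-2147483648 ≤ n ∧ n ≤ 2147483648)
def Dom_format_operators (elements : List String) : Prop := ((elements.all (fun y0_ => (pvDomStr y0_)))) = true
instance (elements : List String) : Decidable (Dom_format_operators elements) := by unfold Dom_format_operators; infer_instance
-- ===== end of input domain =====

-- B replaces A's per-element counter state machine by a chunking decomposition: groups of three sliced out by a step-3 range, one block per group; objective: alternative.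

-- ===== PORT A =====
-- A's loop: a running string and a counter i that cycles 0,1,2 (reset to 0 after the third label).
def format_operators (elements : List String) : String :=
  (elements.foldl
    (fun (st : String × Int) elem =>
      if st.2 == 0 then (st.1 ++ "id: " ++ elem ++ "\n", st.2 + 1)
      else if st.2 == 1 then (st.1 ++ "info: " ++ elem ++ "\n", st.2 + 1)
      else if st.2 == 2 then (st.1 ++ "available: " ++ elem ++ "\n\n", 0)
      else st)
    ("", 0)).1

-- ===== PORT B =====
-- one iteration of B's loop body: group = elems[i:i+3] is passed here as 'group';
-- group[0] always exists (the range guarantees a non-empty group), so the pyGetD default "" is unreachable.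
def pvBlock (group : List String) : String :=
  "id: " ++ (PySem.List.pyGetD group 0 "") ++ "\n"
  ++ (if group.length > 1 then "info: " ++ (PySem.List.pyGetD group 1 "") ++ "\n" else "")
  ++ (if group.length > 2 then "available: " ++ (PySem.List.pyGetD group 2 "") ++ "\n\n" else "")

-- for i in range(0, len(elems), 3): parts.append(block of elems[i:i+3]); return "".join(parts)
def format_operators_alt (elements : List String) : String :=
  PySem.Str.join ""
    ((PySem.List.pyRange 0 (elements.length : Int) 3).map (fun i =>
      pvBlock (PySem.List.slice elements (some i) (some (i + 3)))))

-- ===== PRECONDITION & SPEC =====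
def Spec_format_operators (elements : List String) (out : String) : Prop := out = format_operators_alt elements
instance (elements : List String) (out : String) : Decidable (Spec_format_operators elements out) := by unfold Spec_format_operators; infer_instance

-- ===== CLAIM =====
def Claim_equal_format_operators : Prop := ∀ (elements : List String), Dom_format_operators elements → Spec_format_operators elements (format_operators elements)

-- ===== LEMMAS AND PROOFS =====

theorem pv_join_empty_cons (y : String) (rest : List String) :
    PySem.Str.join "" (y :: rest) = y ++ PySem.Str.join "" rest := by
  cases rest <;> simp [PySem.Str.join, PySem.Chars.join_cons_cons]

-- B's join over the step-3 range satisfies the chunk recursion: first block, then the rest on drop 3.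
theorem pv_alt_step (xs : List String) (h : xs ≠ []) :
    format_operators_alt xs
      = pvBlock (xs.take 3) ++ format_operators_alt (xs.drop 3) := by
  unfold format_operators_alt
  have hn : 0 < xs.length := List.length_pos_iff.mpr h
  rw [PySem.List.pyRange_of_pos _ _ (by norm_num), PySem.List.pyRange_of_pos _ _ (by norm_num)]
  have hcount : ((xs.length : Int) - 0 + 3 - 1) / 3
      = (((xs.length + 2) / 3 : Nat) : Int) := by
    push_cast [Int.natCast_div]
    omega
  rw [if_pos (by exact_mod_cast hn), hcount, Int.toNat_natCast]
  have hc : (xs.length + 2) / 3 = ((xs.drop 3).length + 2) / 3 + 1 := by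
    simp only [List.length_drop]
    omega
  rw [hc, List.range_succ_eq_map, List.map_cons, List.map_cons, List.map_map, pv_join_empty_cons]
  congr 1
  · -- head block: slice xs 0 3 = xs.take 3
    norm_num
    simp [pysem]
  · -- tail: each later chunk of xs is a chunk of xs.drop 3, shifted by one
    by_cases hlt : (xs.drop 3).length = 0
    · simp [hlt]
    · rw [if_pos (by exact_mod_cast Nat.pos_of_ne_zero hlt)]
      have hcount2 : (((xs.drop 3).length : Int) - 0 + 3 - 1) / 3
          = ((((xs.drop 3).length + 2) / 3 : Nat) : Int) := by
        push_cast [Int.natCast_div]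
        omega
      rw [hcount2, Int.toNat_natCast, List.map_map, List.map_map]
      refine congrArg (PySem.Str.join "") ?_
      apply List.map_congr_left
      intro k _
      simp only [Function.comp]
      congr 1
      -- slice xs (3*(k+1)) (3*(k+1)+3) = slice (xs.drop 3) (3*k) (3*k+3)
      have e1 : (0 : Int) + 3 * ((Nat.succ k : Nat) : Int) + 3 = ((3 * k + 6 : Nat) : Int) := by push_cast; ring
      have e2 : (0 : Int) + 3 * ((Nat.succ k : Nat) : Int) = ((3 * k + 3 : Nat) : Int) := by push_cast; ring
      have e3 : (0 : Int) + 3 * ((k : Nat) : Int) = (((3 * k : Nat)) : Int) := by push_cast; ring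
      have e4 : (0 : Int) + 3 * ((k : Nat) : Int) + 3 = (((3 * k + 3 : Nat)) : Int) := by push_cast; ring
      rw [e1, e2, e4, e3, PySem.List.slice_natCast, PySem.List.slice_natCast, List.drop_drop,
          show 3 * k + 6 - (3 * k + 3) = 3 from by omega,
          show 3 * k + 3 - 3 * k = 3 from by omega,
          show 3 + 3 * k = 3 * k + 3 from by omega]

-- loop invariant: A's fold started at counter 0 with accumulator acc produces acc ++ (B on the rest).
theorem pv_key (xs : List String) (acc : String) :
    (xs.foldl
      (fun (st : String × Int) elem =>
        if st.2 == 0 then (st.1 ++ "id: " ++ elem ++ "\n", st.2 + 1)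
        else if st.2 == 1 then (st.1 ++ "info: " ++ elem ++ "\n", st.2 + 1)
        else if st.2 == 2 then (st.1 ++ "available: " ++ elem ++ "\n\n", 0)
        else st)
      (acc, 0)).1 = acc ++ format_operators_alt xs := by
  induction hn : xs.length using Nat.strong_induction_on generalizing xs acc with
  | _ n ih =>
    match xs with
    | [] => simp [format_operators_alt, PySem.List.pyRange, PySem.Str.join]
    | [a] =>
        rw [pv_alt_step _ (by simp)]
        simp [format_operators_alt, pvBlock, PySem.List.pyGetD, PySem.List.pyGet?,
              PySem.List.pyIdx?, PySem.List.pyRange, PySem.Str.join, String.append_assoc]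
    | [a, b] =>
        rw [pv_alt_step _ (by simp)]
        simp [format_operators_alt, pvBlock, PySem.List.pyGetD, PySem.List.pyGet?,
              PySem.List.pyIdx?, PySem.List.pyRange, PySem.Str.join, String.append_assoc]
    | a :: b :: c :: rest =>
        rw [pv_alt_step _ (by simp)]
        simp only [List.foldl_cons, List.take_succ_cons, List.take_zero, List.drop_succ_cons,
                   List.drop_zero]
        norm_num [pvBlock, PySem.List.pyGetD, PySem.List.pyGet?, PySem.List.pyIdx?]
        have H := ih rest.length (by subst hn; simp; omega)
          rest (acc ++ "id: " ++ a ++ "\n" ++ "info: " ++ b ++ "\n" ++ "available: " ++ c ++ "\n\n") rfl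
        norm_num at H
        rw [H]
        simp only [String.append_assoc]
        rfl

-- ===== VERDICT =====
theorem format_operators_spec : Claim_equal_format_operators := by
  intro elements _
  unfold Spec_format_operators format_operators
  simpa using pv_key elements ""
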